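-- pv_equiv track=rewrite | github.com/ahsaniftikharofficial-prog/grabix | backend/app/services/desktop_auth.py | requires_desktop_auth
-- ===== SOURCE A (Python) =====
-- _SENSITIVE_ROUTES: tuple[tuple[str, tuple[str, ...]], ...] = (
--     ("/download", ("GET", "POST")),
--     ("/downloads/", ("POST", "DELETE")),
--     ("/downloads/stop-all", ("POST",)),
--     ("/open-download-folder", ("POST",)),
--     ("/open-local-file", ("POST",)),
--     ("/settings", ("POST",)),
--     ("/settings/adult-content/", ("POST",)),
--     ("/diagnostics/export", ("GET",)),
--     ("/library/", ("POST", "DELETE", "PATCH")),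
--     ("/history/", ("DELETE", "PATCH")),
--     ("/convert", ("POST",)),
--     ("/runtime/dependencies/install", ("POST",)),
-- )
--
-- def requires_desktop_auth(method: str, path: str) -> bool:
--     normalized_method = str(method or "").upper()
--     normalized_path = str(path or "").strip()
--     if not normalized_path.startswith("/"):
--         normalized_path = f"/{normalized_path}"
--
--     for prefix, methods in _SENSITIVE_ROUTES:
--         # FIX: use precise boundary matching so that "/download" does NOT match
--         # "/download-status/...", "/downloads/stream", or "/downloads".
--         # Previously `startswith(prefix)` caused every path beginning with
--         # "/download" — including the read-only polling and SSE endpoints — to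
--         # require the desktop auth header.  In a release EXE the header is
--         # required but _pollTask uses plain fetch() with no header, so every
--         # status poll got a 401, silently hit MAX_CONSECUTIVE_ERRORS (8 tries),
--         # then stopped — leaving the queue item stuck on "Queued" forever.
--         # Precise matching: strip any trailing slash from the prefix, then
--         # require the path to be exact, or continue with "/" or "?".
--         prefix_base = prefix.rstrip("/")
--         path_matches = (
--             normalized_path == prefix_base          # exact (no trailing slash)
--             or normalized_path == prefix            # exact (with trailing slash)
--             or normalized_path.startswith(prefix_base + "/")   # sub-resource
--             or normalized_path.startswith(prefix_base + "?")   # query string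
--         )
--         if path_matches and normalized_method in methods:
--             return True
--     return False
-- ===== SOURCE B (Python) =====
-- _SENSITIVE_ROUTES: tuple[tuple[str, tuple[str, ...]], ...] = (
--     ("/download", ("GET", "POST")),
--     ("/downloads/", ("POST", "DELETE")),
--     ("/downloads/stop-all", ("POST",)),
--     ("/open-download-folder", ("POST",)),
--     ("/open-local-file", ("POST",)),
--     ("/settings", ("POST",)),
--     ("/settings/adult-content/", ("POST",)),
--     ("/diagnostics/export", ("GET",)),
--     ("/library/", ("POST", "DELETE", "PATCH")),
--     ("/history/", ("DELETE", "PATCH")),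
--     ("/convert", ("POST",)),
--     ("/runtime/dependencies/install", ("POST",)),
-- )
--
-- # Reverse lookup table: trailing-slash-stripped route base -> allowed methods.
-- _ROUTE_METHODS: dict[str, tuple[str, ...]] = {
--     prefix.rstrip("/"): methods for prefix, methods in _SENSITIVE_ROUTES
-- }
--
--
-- def requires_desktop_auth(method: str, path: str) -> bool:
--     m = str(method or "").upper()
--     p = str(path or "").strip()
--     if not p.startswith("/"):
--         p = "/" + p
--     # Single pass over the path up to the query string: every '/' boundary
--     # yields an ancestor prefix, looked up in the table instead of scanning
--     # the route list per path.
--     i, n = 0, len(p)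
--     while i < n and p[i] != "?":
--         if i > 0 and p[i] == "/":
--             ms = _ROUTE_METHODS.get(p[:i])
--             if ms is not None and m in ms:
--                 return True
--         i += 1
--     ms = _ROUTE_METHODS.get(p[:i])
--     return ms is not None and m in ms
-- ===== Notes on version B (the rewrite author's own statement) =====
-- stated objective: alternative
-- what changed: B precomputes a dict from slash-stripped route bases to allowed methods and answers by a single pass over the path up to the query string, looking up each '/'-boundary ancestor prefix, instead of A's per-call scan of the route table with four boundary string tests per route.
import Mathlib
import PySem

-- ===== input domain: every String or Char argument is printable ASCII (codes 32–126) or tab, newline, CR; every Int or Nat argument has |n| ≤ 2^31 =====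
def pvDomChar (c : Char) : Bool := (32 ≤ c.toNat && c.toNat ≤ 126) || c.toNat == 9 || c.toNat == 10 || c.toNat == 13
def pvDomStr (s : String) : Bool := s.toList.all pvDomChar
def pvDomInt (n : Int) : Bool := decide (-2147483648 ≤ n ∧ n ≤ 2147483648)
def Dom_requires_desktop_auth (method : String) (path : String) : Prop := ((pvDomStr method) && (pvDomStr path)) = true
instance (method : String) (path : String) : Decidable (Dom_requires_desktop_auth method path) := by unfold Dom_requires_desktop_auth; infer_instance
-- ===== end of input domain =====

-- B replaces A's per-call scan of the route table (four boundary tests per route) with a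
-- precomputed base->methods dict queried once per '/'-boundary ancestor prefix of the path,
-- in one pass that stops at the query string (objective: alternative; same result everywhere).

-- ===== PORT A =====
-- Python's s.rstrip("/") (rstrip with a chars argument; PySem.Chars.rstrip is whitespace-only).
-- Exact: drops the longest trailing run of '/' characters.
def pvRstripSlash (s : List Char) : List Char := ((s.reverse).dropWhile (fun c => c == '/')).reverse

-- _SENSITIVE_ROUTES (shared data table; Source B carries the same literal tuple)
def pvRoutes : List (List Char × List (List Char)) :=
  [("/download".toList, ["GET".toList, "POST".toList]),
   ("/downloads/".toList, ["POST".toList, "DELETE".toList]),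
   ("/downloads/stop-all".toList, ["POST".toList]),
   ("/open-download-folder".toList, ["POST".toList]),
   ("/open-local-file".toList, ["POST".toList]),
   ("/settings".toList, ["POST".toList]),
   ("/settings/adult-content/".toList, ["POST".toList]),
   ("/diagnostics/export".toList, ["GET".toList]),
   ("/library/".toList, ["POST".toList, "DELETE".toList, "PATCH".toList]),
   ("/history/".toList, ["DELETE".toList, "PATCH".toList]),
   ("/convert".toList, ["POST".toList]),
   ("/runtime/dependencies/install".toList, ["POST".toList])]

-- A's `for prefix, methods in _SENSITIVE_ROUTES: ... return True / return False`
def pvLoopA (nm np : List Char) : List (List Char × List (List Char)) → Bool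
  | [] => false
  | (pfx, methods) :: rest =>
    let base := pvRstripSlash pfx
    if (np == base || np == pfx
        || PySem.Chars.startswith np (base ++ ['/'])
        || PySem.Chars.startswith np (base ++ ['?'])) && methods.contains nm
    then true
    else pvLoopA nm np rest

def requires_desktop_auth (method : String) (path : String) : Bool :=
  -- str(method or "").upper(); str(x or "") is the identity on a str argument
  let nm := PySem.Chars.upper method.toList
  let np0 := PySem.Chars.strip path.toList
  let np := if PySem.Chars.startswith np0 ['/'] then np0 else '/' :: np0
  pvLoopA nm np pvRoutes

-- ===== PORT B =====
-- _ROUTE_METHODS = {prefix.rstrip("/"): methods for prefix, methods in _SENSITIVE_ROUTES}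
def pvRouteMethods : PySem.Dict (List Char) (List (List Char)) :=
  pvRoutes.foldl (fun d pm => d.insert (pvRstripSlash pm.1) pm.2) PySem.Dict.empty

-- `ms = _ROUTE_METHODS.get(c); ms is not None and m in ms`
def pvHitB (nm c : List Char) : Bool :=
  match pvRouteMethods.get? c with
  | some ms => ms.contains nm
  | none => false

-- `while i < n and p[i] != "?": ...` followed by the final lookup of p[:i];
-- p[:i] with 0 ≤ i ≤ len(p) is List.take i.
def pvScanB (nm np : List Char) (i : Nat) : Bool :=
  if _h : i < np.length then
    if np[i]! = '?' then pvHitB nm (np.take i)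
    else if 0 < i ∧ np[i]! = '/' then
      (if pvHitB nm (np.take i) then true else pvScanB nm np (i + 1))
    else pvScanB nm np (i + 1)
  else pvHitB nm (np.take i)
termination_by np.length - i

def requires_desktop_auth_alt (method : String) (path : String) : Bool :=
  let nm := PySem.Chars.upper method.toList
  let np0 := PySem.Chars.strip path.toList
  let np := if PySem.Chars.startswith np0 ['/'] then np0 else '/' :: np0
  pvScanB nm np 0

-- ===== PRECONDITION & SPEC =====
def Spec_requires_desktop_auth (method : String) (path : String) (out : Bool) : Prop := out = requires_desktop_auth_alt method path
instance (method : String) (path : String) (out : Bool) : Decidable (Spec_requires_desktop_auth method path out) := by unfold Spec_requires_desktop_auth; infer_instance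

-- ===== CLAIM (what is proved, stated in full; the proofs are below) =====
def Claim_equal_requires_desktop_auth : Prop := ∀ (method : String) (path : String), Dom_requires_desktop_auth method path → Spec_requires_desktop_auth method path (requires_desktop_auth method path)

-- ===== LEMMAS AND PROOFS =====

-- the part of the normalized path before the first '?': what B's scan effectively walks
def pvStem (np : List Char) : List Char := np.takeWhile (fun c => !(c == '?'))

-- A's per-route match condition and B's candidate condition, as Props
def pvACondP (nm np : List Char) (r : List Char × List (List Char)) : Prop :=
  (np = pvRstripSlash r.1 ∨ np = r.1 ∨ pvRstripSlash r.1 ++ ['/'] <+: np ∨ pvRstripSlash r.1 ++ ['?'] <+: np)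
  ∧ r.2.contains nm = true

def pvCCondP (nm np : List Char) (r : List Char × List (List Char)) : Prop :=
  ((∃ j, 0 < j ∧ j < (pvStem np).length ∧ (pvStem np)[j]? = some '/' ∧ (pvStem np).take j = pvRstripSlash r.1)
    ∨ pvStem np = pvRstripSlash r.1)
  ∧ r.2.contains nm = true

lemma pvLoopA_eq_any (nm np : List Char) (rs : List (List Char × List (List Char))) :
    pvLoopA nm np rs = rs.any (fun r =>
      (np == pvRstripSlash r.1 || np == r.1
        || PySem.Chars.startswith np (pvRstripSlash r.1 ++ ['/'])
        || PySem.Chars.startswith np (pvRstripSlash r.1 ++ ['?'])) && r.2.contains nm) := by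
  induction rs with
  | nil => rfl
  | cons r rest ih =>
    obtain ⟨pfx, ms⟩ := r
    simp only [pvLoopA, List.any_cons, ih]
    cases hc : (np == pvRstripSlash pfx || np == pfx
        || PySem.Chars.startswith np (pvRstripSlash pfx ++ ['/'])
        || PySem.Chars.startswith np (pvRstripSlash pfx ++ ['?'])) && ms.contains nm <;>
      simp

lemma pvLoopA_iff (nm np : List Char) (rs : List (List Char × List (List Char))) :
    pvLoopA nm np rs = true ↔ ∃ r ∈ rs, pvACondP nm np r := by
  rw [pvLoopA_eq_any, List.any_eq_true]
  refine exists_congr fun r => and_congr_right fun _ => ?_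
  simp only [pvACondP, Bool.and_eq_true, Bool.or_eq_true, beq_iff_eq,
    PySem.Chars.startswith_iff, List.contains_eq_mem, decide_eq_true_eq]
  tauto

-- ---- facts about pvStem ----

lemma pvStem_prefix (np : List Char) : pvStem np <+: np := List.takeWhile_prefix _

lemma pvStem_length_le (np : List Char) : (pvStem np).length ≤ np.length :=
  (pvStem_prefix np).length_le

lemma pvStem_take (np : List Char) : np.take (pvStem np).length = pvStem np :=
  (List.prefix_iff_eq_take.mp (pvStem_prefix np)).symm

lemma pvStem_take_eq (np : List Char) (j : Nat) (hj : j ≤ (pvStem np).length) :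
    np.take j = (pvStem np).take j := by
  conv_rhs => rw [← pvStem_take np]
  rw [List.take_take, Nat.min_eq_left hj]

lemma pvStem_no_q (np : List Char) : ∀ c ∈ pvStem np, c ≠ '?' := by
  intro c hc
  have := List.mem_takeWhile_imp hc
  simpa using this

lemma pvStem_getElem? (np : List Char) (j : Nat) (hj : j < (pvStem np).length) :
    np[j]? = (pvStem np)[j]? := by
  obtain ⟨t, ht⟩ := pvStem_prefix np
  conv_lhs => rw [← ht]
  rw [List.getElem?_append_left hj]

lemma pvStem_stop (np : List Char) (h : (pvStem np).length < np.length) :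
    np[(pvStem np).length]? = some '?' := by
  have ht : pvStem np ++ np.dropWhile (fun c => !(c == '?')) = np :=
    List.takeWhile_append_dropWhile
  cases hdw : np.dropWhile (fun c => !(c == '?')) with
  | nil =>
    exfalso
    rw [hdw, List.append_nil] at ht
    rw [ht] at h
    omega
  | cons c t =>
    have hc : (fun c => !(c == '?')) c = false := by
      have := List.head_dropWhile_not (fun c => !(c == '?')) (l := np)
        (by rw [hdw]; simp)
      simpa [hdw] using this
    have hcq : c = '?' := by simpa using hc
    rw [hdw] at ht
    have hg := List.getElem?_append_right (l₁ := pvStem np) (l₂ := c :: t)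
      (i := (pvStem np).length) (le_refl _)
    rw [ht] at hg
    rw [hg]
    simp [hcq]

-- ---- characterization of B's lookup ----

lemma pvItems_eq : pvRouteMethods.items = pvRoutes.map (fun r => (pvRstripSlash r.1, r.2)) := by decide

lemma pvKeysNodup : pvRouteMethods.keys.Nodup := by decide

lemma pvHitB_iff (nm c : List Char) :
    pvHitB nm c = true ↔ ∃ r ∈ pvRoutes, c = pvRstripSlash r.1 ∧ r.2.contains nm = true := by
  unfold pvHitB
  cases hg : pvRouteMethods.get? c with
  | none =>
    simp only [Bool.false_eq_true, false_iff]
    rintro ⟨r, hr, rfl, _⟩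
    have hmem : (pvRstripSlash r.1, r.2) ∈ pvRouteMethods.items := by
      rw [pvItems_eq]
      exact List.mem_map.mpr ⟨r, hr, rfl⟩
    have hsome := PySem.Dict.get?_of_mem_items _ hmem pvKeysNodup
    rw [hg] at hsome
    cases hsome
  | some ms =>
    have hmem := (PySem.Dict.get?_eq_some_iff_mem_items _ c ms pvKeysNodup).mp hg
    rw [pvItems_eq] at hmem
    obtain ⟨r, hr, heq⟩ := List.mem_map.mp hmem
    obtain ⟨h1, h2⟩ : pvRstripSlash r.1 = c ∧ r.2 = ms := Prod.mk.injEq .. ▸ heq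
    constructor
    · intro hc
      exact ⟨r, hr, h1.symm, by rw [h2]; exact hc⟩
    · rintro ⟨r', hr', hc', hcont'⟩
      have hmem' : (c, r'.2) ∈ pvRouteMethods.items := by
        rw [pvItems_eq]
        exact List.mem_map.mpr ⟨r', hr', by rw [← hc']⟩
      have hsome := PySem.Dict.get?_of_mem_items _ hmem' pvKeysNodup
      rw [hg] at hsome
      rw [Option.some.inj hsome]
      exact hcont'

-- ---- characterization of B's scan ----

lemma pvScanB_iff (nm np : List Char) :
    ∀ k i, (pvStem np).length - i = k → i ≤ (pvStem np).length →
    (pvScanB nm np i = true ↔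
      (∃ j, i ≤ j ∧ 0 < j ∧ j < (pvStem np).length ∧ (pvStem np)[j]? = some '/' ∧
        pvHitB nm ((pvStem np).take j) = true)
      ∨ pvHitB nm (pvStem np) = true) := by
  intro k
  induction k with
  | zero =>
    intro i hk hile
    have hi : i = (pvStem np).length := by omega
    subst hi
    have hbranch : pvScanB nm np (pvStem np).length = pvHitB nm (pvStem np) := by
      rw [pvScanB]
      by_cases hlt : (pvStem np).length < np.length
      · rw [dif_pos hlt]
        have hq : np[(pvStem np).length]! = '?' := by
          rw [getElem!_pos np _ hlt]
          have hs := pvStem_stop np hlt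
          rw [List.getElem?_eq_getElem hlt] at hs
          exact Option.some.inj hs
        rw [if_pos hq, pvStem_take np]
      · rw [dif_neg hlt, pvStem_take np]
    rw [hbranch]
    constructor
    · exact Or.inr
    · rintro (⟨j, hij, _, hjlt, _⟩ | h)
      · omega
      · exact h
  | succ k ih =>
    intro i hk hile
    have hilt : i < (pvStem np).length := by omega
    have hlt : i < np.length := lt_of_lt_of_le hilt (pvStem_length_le np)
    have hget : np[i]! = (pvStem np)[i] := by
      rw [getElem!_pos np i hlt]
      have hgg := pvStem_getElem? np i hilt
      rw [List.getElem?_eq_getElem hlt, List.getElem?_eq_getElem hilt] at hgg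
      exact Option.some.inj hgg
    have hnq : ¬ np[i]! = '?' := by
      rw [hget]
      exact pvStem_no_q np _ (List.getElem_mem hilt)
    have htk : np.take i = (pvStem np).take i := pvStem_take_eq np i (le_of_lt hilt)
    have ihx := ih (i + 1) (by omega) (by omega)
    rw [pvScanB, dif_pos hlt, if_neg hnq]
    by_cases hsl : 0 < i ∧ np[i]! = '/'
    · rw [if_pos hsl]
      by_cases hhit : pvHitB nm (np.take i) = true
      · rw [if_pos hhit]
        simp only [true_iff]
        left
        refine ⟨i, le_refl i, hsl.1, hilt, ?_, by rw [← htk]; exact hhit⟩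
        rw [List.getElem?_eq_getElem hilt, ← hget, hsl.2]
      · rw [if_neg hhit, ihx]
        constructor
        · rintro (⟨j, hij, h1, h2, h3, h4⟩ | h)
          · exact Or.inl ⟨j, by omega, h1, h2, h3, h4⟩
          · exact Or.inr h
        · rintro (⟨j, hij, h1, h2, h3, h4⟩ | h)
          · rcases Nat.eq_or_lt_of_le hij with heq | hlt'
            · exfalso
              apply hhit
              rw [htk, heq]
              exact h4
            · exact Or.inl ⟨j, hlt', h1, h2, h3, h4⟩
          · exact Or.inr h
    · rw [if_neg hsl, ihx]
      constructor
      · rintro (⟨j, hij, h1, h2, h3, h4⟩ | h)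
        · exact Or.inl ⟨j, by omega, h1, h2, h3, h4⟩
        · exact Or.inr h
      · rintro (⟨j, hij, h1, h2, h3, h4⟩ | h)
        · rcases Nat.eq_or_lt_of_le hij with heq | hlt'
          · exfalso
            apply hsl
            subst heq
            refine ⟨h1, ?_⟩
            rw [hget]
            rw [List.getElem?_eq_getElem h2] at h3
            exact Option.some.inj h3
          · exact Or.inl ⟨j, hlt', h1, h2, h3, h4⟩
        · exact Or.inr h

-- ---- per-route bridge between A's match and B's candidate condition ----

lemma seg_prefix_iff (B cs : List Char) (hB : B ≠ []) :
    (∃ j, 0 < j ∧ j < cs.length ∧ cs[j]? = some '/' ∧ cs.take j = B) ↔ B ++ ['/'] <+: cs := by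
  constructor
  · rintro ⟨j, hj0, hjlt, hjget, hjtake⟩
    have hgj : cs[j] = '/' := by
      rw [List.getElem?_eq_getElem hjlt] at hjget
      exact Option.some.inj hjget
    refine ⟨cs.drop (j + 1), ?_⟩
    calc B ++ ['/'] ++ cs.drop (j + 1)
        = cs.take j ++ cs[j] :: cs.drop (j + 1) := by rw [hjtake, hgj]; simp
      _ = cs.take j ++ cs.drop j := by rw [List.drop_eq_getElem_cons hjlt]
      _ = cs := List.take_append_drop j cs
  · rintro ⟨t, ht⟩
    have ht' : B ++ '/' :: t = cs := by rw [← ht]; simp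
    refine ⟨B.length, List.length_pos_iff.mpr hB, ?_, ?_, ?_⟩
    · rw [← ht']
      simp only [List.length_append, List.length_cons]
      omega
    · have hg := List.getElem?_append_right (l₁ := B) (l₂ := '/' :: t)
        (i := B.length) (le_refl _)
      rw [ht'] at hg
      rw [hg]
      simp
    · have htl := List.take_left' (l₁ := B) (l₂ := '/' :: t) (i := B.length) rfl
      rw [← ht']
      exact htl

lemma prefix_stem (np l : List Char) (hq : ∀ c ∈ l, c ≠ '?') :
    l <+: np ↔ l <+: pvStem np := by
  constructor
  · rintro ⟨t, rfl⟩
    unfold pvStem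
    rw [List.takeWhile_append_of_pos (by intro c hc; simpa using hq c hc)]
    exact List.prefix_append l _
  · intro h
    exact h.trans (pvStem_prefix np)

lemma stem_eq_iff (np B : List Char) (hq : '?' ∉ B) :
    pvStem np = B ↔ (np = B ∨ B ++ ['?'] <+: np) := by
  constructor
  · intro h
    have ht : pvStem np ++ np.dropWhile (fun c => !(c == '?')) = np :=
      List.takeWhile_append_dropWhile
    cases hdw : np.dropWhile (fun c => !(c == '?')) with
    | nil =>
      left
      rw [hdw, List.append_nil] at ht
      rw [← ht, h]
    | cons c t =>
      right
      have hcq : c = '?' := by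
        have hc := List.head_dropWhile_not (fun c => !(c == '?')) (l := np)
          (by rw [hdw]; simp)
        simpa [hdw] using hc
      rw [hdw] at ht
      exact ⟨t, by rw [← ht, h, hcq]; simp⟩
  · rintro (rfl | ⟨t, ht⟩)
    · unfold pvStem
      rw [List.takeWhile_eq_self_iff]
      intro c hc
      simp only [Bool.not_eq_eq_eq_not, Bool.not_true]
      exact beq_eq_false_iff_ne.mpr (fun h => hq (h ▸ hc))
    · rw [← ht]
      unfold pvStem
      rw [List.append_assoc]
      rw [List.takeWhile_append_of_pos (by
        intro c hc
        simp only [Bool.not_eq_eq_eq_not, Bool.not_true]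
        exact beq_eq_false_iff_ne.mpr (fun h => hq (h ▸ hc)))]
      simp

lemma route_iff (nm np : List Char) (r : List Char × List (List Char))
    (hB : pvRstripSlash r.1 ≠ []) (hq : '?' ∉ pvRstripSlash r.1)
    (hpfx : r.1 = pvRstripSlash r.1 ∨ r.1 = pvRstripSlash r.1 ++ ['/']) :
    pvACondP nm np r ↔ pvCCondP nm np r := by
  unfold pvACondP pvCCondP
  set B := pvRstripSlash r.1 with hBdef
  refine and_congr_left fun _ => ?_
  rw [seg_prefix_iff B _ hB]
  have hslash : B ++ ['/'] <+: np ↔ B ++ ['/'] <+: pvStem np := by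
    refine prefix_stem np _ ?_
    intro c hc
    rcases List.mem_append.mp hc with h | h
    · exact fun he => hq (he ▸ h)
    · simp only [List.mem_singleton] at h
      subst h
      decide
  have heq := stem_eq_iff np B hq
  constructor
  · rintro (h | h | h | h)
    · exact Or.inr (heq.mpr (Or.inl h))
    · rcases hpfx with hp | hp
      · exact Or.inr (heq.mpr (Or.inl (by rw [h, hp])))
      · exact Or.inl (hslash.mp ⟨[], by rw [List.append_nil, ← hp, h]⟩)
    · exact Or.inl (hslash.mp h)
    · exact Or.inr (heq.mpr (Or.inr h))
  · rintro (h | h)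
    · exact Or.inr (Or.inr (Or.inl (hslash.mpr h)))
    · rcases heq.mp h with h' | h'
      · exact Or.inl h'
      · exact Or.inr (Or.inr (Or.inr h'))

lemma pvSide : ∀ r ∈ pvRoutes, pvRstripSlash r.1 ≠ [] ∧ '?' ∉ pvRstripSlash r.1 ∧
    (r.1 = pvRstripSlash r.1 ∨ r.1 = pvRstripSlash r.1 ++ ['/']) := by decide

-- ---- assembly ----

lemma pvMain (nm np : List Char) : pvLoopA nm np pvRoutes = pvScanB nm np 0 := by
  apply Bool.coe_iff_coe.mp
  rw [pvLoopA_iff, pvScanB_iff nm np ((pvStem np).length - 0) 0 rfl (Nat.zero_le _)]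
  constructor
  · rintro ⟨r, hr, hA⟩
    obtain ⟨hB, hq, hpfx⟩ := pvSide r hr
    obtain ⟨hcand, hcont⟩ := (route_iff nm np r hB hq hpfx).mp hA
    rcases hcand with ⟨j, hj0, hjlt, hget, htake⟩ | hst
    · exact Or.inl ⟨j, Nat.zero_le _, hj0, hjlt, hget,
        (pvHitB_iff nm _).mpr ⟨r, hr, htake, hcont⟩⟩
    · exact Or.inr ((pvHitB_iff nm _).mpr ⟨r, hr, hst, hcont⟩)
  · rintro (⟨j, _, hj0, hjlt, hget, hhit⟩ | hhit)
    · obtain ⟨r, hr, hc, hcont⟩ := (pvHitB_iff nm _).mp hhit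
      obtain ⟨hB, hq, hpfx⟩ := pvSide r hr
      exact ⟨r, hr, (route_iff nm np r hB hq hpfx).mpr
        ⟨Or.inl ⟨j, hj0, hjlt, hget, hc⟩, hcont⟩⟩
    · obtain ⟨r, hr, hc, hcont⟩ := (pvHitB_iff nm _).mp hhit
      obtain ⟨hB, hq, hpfx⟩ := pvSide r hr
      exact ⟨r, hr, (route_iff nm np r hB hq hpfx).mpr ⟨Or.inr hc, hcont⟩⟩

-- ===== VERDICT (by name: the statement is the Claim_ definition above) =====
theorem requires_desktop_auth_spec : Claim_equal_requires_desktop_auth := by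
  intro method path _
  unfold Spec_requires_desktop_auth requires_desktop_auth requires_desktop_auth_alt
  exact pvMain _ _
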